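-- pv_equiv track=rewrite | github.com/shiveshsky/datastructures | heaps/3_largest.py | solve
-- ===== SOURCE A (Python) =====
-- import math
--
-- def solve(A):
--     # max(3 max, 2 min and 1 max)
--     ans = []
--     max1 = -math.inf
--     max2 = -math.inf
--     max3 = -math.inf
--
--     min1 = math.inf
--     min2 = math.inf
--     for ind, i in enumerate(A):
--         if i<=min1:
--             min2=min1
--             min1=i
--         elif i<=min2:
--             min2=i
--         if i>=max1:
--             max3=max2
--             max2=max1
--             max1=i
--         elif i>=max2:
--             max3=max2
--             max2=i
--         elif i>=max3:
--             max3=i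
--         if ind<2:
--             ans.append(-1)
--         else:
--             max_prod = 1
--             if max1 != -math.inf:
--                 max_prod*=max1
--             if max2 != -math.inf:
--                 max_prod*=max2
--             if max3 != -math.inf:
--                 max_prod*=max3
--             min_prod = 1
--             if max1 != -math.inf:
--                 min_prod *= max1
--             if min1 != math.inf:
--                 min_prod*= min1
--             if min2 != math.inf:
--                 min_prod *= min2
--             ans.append(max((max_prod), (min_prod)))
--     return ans
-- ===== SOURCE B (Python) =====
-- def solve(A):
--     ans = []
--     for ind in range(len(A)):
--         if ind < 2:
--             ans.append(-1)
--         else: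
--             s = sorted(A[:ind + 1])
--             ans.append(max(s[-1] * s[-2] * s[-3], s[-1] * s[0] * s[1]))
--     return ans
-- ===== Notes on version B (the rewrite author's own statement) =====
-- stated objective: simpler
-- what changed: Replaces A's incremental top-3/bottom-2 tracking with infinity sentinels and guard chains by a direct per-prefix computation: sort the prefix and take max(product of three largest, product of two smallest times the largest).
import Mathlib
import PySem

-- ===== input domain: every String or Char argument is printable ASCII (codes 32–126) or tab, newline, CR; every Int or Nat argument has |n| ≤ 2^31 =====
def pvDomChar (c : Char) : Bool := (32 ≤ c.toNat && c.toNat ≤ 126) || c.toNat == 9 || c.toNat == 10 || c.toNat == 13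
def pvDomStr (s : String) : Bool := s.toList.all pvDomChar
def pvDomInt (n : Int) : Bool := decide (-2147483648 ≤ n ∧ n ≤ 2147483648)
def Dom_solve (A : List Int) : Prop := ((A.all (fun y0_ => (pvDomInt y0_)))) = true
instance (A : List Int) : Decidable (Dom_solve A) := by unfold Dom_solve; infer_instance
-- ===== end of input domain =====

-- B replaces A's incremental top-3/bottom-2 tracking by a per-prefix sort (objective: simpler).

-- ===== PORT A =====
-- sentinel for math.inf: exact on Dom_solve, whose integers satisfy |n| ≤ 2^31 < 2^63
def pvINF : Int := 9223372036854775808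

def solveStep (st : List Int × (Int × Int × Int) × (Int × Int)) (pr : Int × Int) :
    List Int × (Int × Int × Int) × (Int × Int) :=
  let ans := st.1
  let mx := st.2.1
  let mn := st.2.2
  let ind := pr.1
  let i := pr.2
  -- if i<=min1: min2=min1; min1=i  elif i<=min2: min2=i
  let mn' : Int × Int := if i ≤ mn.1 then (i, mn.1) else if i ≤ mn.2 then (mn.1, i) else mn
  -- if i>=max1: … elif i>=max2: … elif i>=max3: …
  let mx' : Int × Int × Int :=
    if i ≥ mx.1 then (i, mx.1, mx.2.1)
    else if i ≥ mx.2.1 then (mx.1, i, mx.2.1)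
    else if i ≥ mx.2.2 then (mx.1, mx.2.1, i)
    else mx
  let ans' :=
    if ind < 2 then ans ++ [(-1 : Int)]
    else
      let mp0 : Int := 1
      let mp1 := if mx'.1 ≠ -pvINF then mp0 * mx'.1 else mp0
      let mp2 := if mx'.2.1 ≠ -pvINF then mp1 * mx'.2.1 else mp1
      let mp3 := if mx'.2.2 ≠ -pvINF then mp2 * mx'.2.2 else mp2
      let np0 : Int := 1
      let np1 := if mx'.1 ≠ -pvINF then np0 * mx'.1 else np0
      let np2 := if mn'.1 ≠ pvINF then np1 * mn'.1 else np1
      let np3 := if mn'.2 ≠ pvINF then np2 * mn'.2 else np2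
      ans ++ [max mp3 np3]
  (ans', mx', mn')

def solve (A : List Int) : List Int :=
  ((PySem.List.enumerate A 0).foldl solveStep
    ([], (-pvINF, -pvINF, -pvINF), (pvINF, pvINF))).1

-- ===== PORT B =====
-- the body of B's loop
def altBody (A : List Int) (ans : List Int) (ind : Int) : List Int :=
  if ind < 2 then ans ++ [(-1 : Int)]
  else
    let s := PySem.List.sorted (PySem.List.slice A none (some (ind + 1))) (fun x => x) false
    -- for ind ≥ 2 the sorted prefix s has ≥ 3 elements, so every index below is in range
    -- and the `.getD 0` default is never taken
    let g := fun (k : Int) => (PySem.List.pyGet? s k).getD 0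
    ans ++ [max (g (-1) * g (-2) * g (-3)) (g (-1) * g 0 * g 1)]

def solve_alt (A : List Int) : List Int :=
  (PySem.List.pyRange 0 (A.length : Int) 1).foldl (altBody A) []

-- ===== PRECONDITION & SPEC =====
def Spec_solve (A : List Int) (out : List Int) : Prop := out = solve_alt A
instance (A : List Int) (out : List Int) : Decidable (Spec_solve A out) := by unfold Spec_solve; infer_instance

-- ===== CLAIM (what is proved, stated in full; the proofs are below) =====
def Claim_equal_solve : Prop := ∀ (A : List Int), Dom_solve A → Spec_solve A (solve A)

-- ===== LEMMAS AND PROOFS =====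

-- the state transformers of A's loop, isolated
def minStep (p : Int × Int) (i : Int) : Int × Int :=
  if i ≤ p.1 then (i, p.1) else if i ≤ p.2 then (p.1, i) else p

def maxStep (t : Int × Int × Int) (i : Int) : Int × Int × Int :=
  if i ≥ t.1 then (i, t.1, t.2.1)
  else if i ≥ t.2.1 then (t.1, i, t.2.1)
  else if i ≥ t.2.2 then (t.1, t.2.1, i)
  else t

-- the two smallest elements of an ascending list / three largest of a descending list, with sentinels
def mn2 : List Int → Int × Int
  | [] => (pvINF, pvINF)
  | [a] => (a, pvINF)
  | a :: b :: _ => (a, b)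

def mx3 : List Int → Int × Int × Int
  | [] => (-pvINF, -pvINF, -pvINF)
  | [a] => (a, -pvINF, -pvINF)
  | [a, b] => (a, b, -pvINF)
  | a :: b :: c :: _ => (a, b, c)

-- insertion into a descending list (mirror of orderedInsert)
def insD (i : Int) : List Int → List Int
  | [] => [i]
  | a :: t => if a < i then i :: a :: t else a :: insD i t

def S (p : List Int) : List Int := PySem.List.sorted p (fun x => x) false

lemma insD_of_forall (i : Int) (d : List Int) (h : ∀ x ∈ d, ¬ x < i) :
    insD i d = d ++ [i] := by
  induction d with
  | nil => rfl
  | cons a t ih =>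
    simp only [insD]
    rw [if_neg (h a (by simp)), ih (fun x hx => h x (by simp [hx]))]
    rfl

lemma insD_append_lt (i a : Int) (h : a < i) (d : List Int) :
    insD i (d ++ [a]) = insD i d ++ [a] := by
  induction d with
  | nil => simp [insD, h]
  | cons x t ih =>
    simp only [List.cons_append, insD]
    by_cases hx : x < i <;> simp [hx, ih]

lemma rev_orderedInsert (i : Int) (s : List Int) (hs : s.Pairwise (· ≤ ·)) :
    (List.orderedInsert (· ≤ ·) i s).reverse = insD i s.reverse := by
  induction s with
  | nil => rfl
  | cons a t ih =>
    rw [List.pairwise_cons] at hs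
    simp only [List.orderedInsert]
    by_cases h : i ≤ a
    · rw [if_pos h]
      rw [insD_of_forall i ((a :: t).reverse)
        (by intro x hx; rw [List.mem_reverse] at hx
            rcases List.mem_cons.mp hx with hx | hx
            · omega
            · exact not_lt.mpr (le_trans h (hs.1 x hx)))]
      simp
    · rw [if_neg h]
      rw [show (a :: List.orderedInsert (· ≤ ·) i t).reverse
            = (List.orderedInsert (· ≤ ·) i t).reverse ++ [a] from List.reverse_cons ..,
          show (a :: t).reverse = t.reverse ++ [a] from List.reverse_cons ..,
          insD_append_lt i a (by omega), ih hs.2]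

lemma S_snoc (p : List Int) (i : Int) :
    S (p ++ [i]) = List.orderedInsert (· ≤ ·) i (S p) := by
  apply PySem.List.sorted_id_eq_of_perm_of_pairwise
  · exact (List.perm_orderedInsert _ _ _).trans
      (((PySem.List.sorted_perm p (fun x => x) false).cons i).trans
        (List.perm_append_singleton i p).symm)
  · exact List.Sorted.orderedInsert i (S p) (PySem.List.sorted_pairwise p (fun x => x))

lemma mn2_orderedInsert (i : Int) (s : List Int) (hi : i < pvINF) :
    mn2 (List.orderedInsert (· ≤ ·) i s) = minStep (mn2 s) i := by
  match s with
  | [] => simp [mn2, minStep, List.orderedInsert, hi, le_of_lt hi]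
  | [a] =>
    simp only [List.orderedInsert, mn2, minStep]
    by_cases h : i ≤ a <;> simp [h, mn2, le_of_lt hi]
  | a :: b :: t =>
    simp only [List.orderedInsert, mn2, minStep]
    by_cases h1 : i ≤ a
    · simp [h1, mn2]
    · rw [if_neg h1, if_neg h1]
      by_cases h2 : i ≤ b <;> simp [h2, mn2]

lemma mx3_insD (i : Int) (r : List Int) (hi : -pvINF < i)
    (hs : r.Pairwise (· ≥ ·)) : mx3 (insD i r) = maxStep (mx3 r) i := by
  match r with
  | [] => simp [insD, mx3, maxStep, le_of_lt hi]
  | [a] =>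
    simp only [insD, mx3, maxStep]
    by_cases h : a < i <;>
      simp only [if_pos, if_neg, h, ite_true, ite_false, mx3] <;>
      split_ifs <;> simp only [Prod.mk.injEq, and_true, true_and] <;> omega
  | [a, b] =>
    have hab : b ≤ a := (List.pairwise_cons.mp hs).1 b (by simp)
    simp only [insD, mx3, maxStep]
    by_cases h1 : a < i
    · simp only [if_pos h1, mx3]
      split_ifs <;> simp only [Prod.mk.injEq, and_true, true_and] <;> omega
    · rw [if_neg h1]
      by_cases h2 : b < i <;>
        simp only [h2, ite_true, ite_false, mx3] <;>
        split_ifs <;> simp only [Prod.mk.injEq, and_true, true_and] <;> omega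
  | a :: b :: c :: t =>
    have h1 := List.pairwise_cons.mp hs
    have h2 := List.pairwise_cons.mp h1.2
    have hab : b ≤ a := h1.1 b (by simp)
    have hac : c ≤ a := h1.1 c (by simp)
    have hbc : c ≤ b := h2.1 c (by simp)
    simp only [insD, mx3, maxStep]
    by_cases g1 : a < i
    · simp only [if_pos g1, mx3]
      split_ifs <;> simp only [Prod.mk.injEq, and_true, true_and] <;> omega
    · rw [if_neg g1]
      by_cases g2 : b < i
      · simp only [if_pos g2, mx3]
        split_ifs <;> simp only [Prod.mk.injEq, and_true, true_and] <;> omega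
      · rw [if_neg g2]
        by_cases g3 : c < i
        · simp only [if_pos g3, mx3]
          split_ifs <;> simp only [Prod.mk.injEq, and_true, true_and] <;> omega
        · rw [if_neg g3]
          rcases ht : insD i t with _ | ⟨y, ys⟩
          · exact absurd ht (by cases t <;> simp [insD] <;> split <;> simp)
          · change (a, b, c) = _
            split_ifs <;> simp only [Prod.mk.injEq, and_true, true_and] <;> omega

-- the value A appends at an index ≥ 2, as a function of the updated state
def pvOut (t : Int × Int × Int) (q : Int × Int) : Int :=
  let mp0 : Int := 1
  let mp1 := if t.1 ≠ -pvINF then mp0 * t.1 else mp0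
  let mp2 := if t.2.1 ≠ -pvINF then mp1 * t.2.1 else mp1
  let mp3 := if t.2.2 ≠ -pvINF then mp2 * t.2.2 else mp2
  let np0 : Int := 1
  let np1 := if t.1 ≠ -pvINF then np0 * t.1 else np0
  let np2 := if q.1 ≠ pvINF then np1 * q.1 else np1
  let np3 := if q.2 ≠ pvINF then np2 * q.2 else np2
  max mp3 np3

lemma solveStep_eq (ans : List Int) (t : Int × Int × Int) (q : Int × Int) (ind i : Int) :
    solveStep (ans, t, q) (ind, i) =
      (if ind < 2 then ans ++ [(-1 : Int)]
       else ans ++ [pvOut (maxStep t i) (minStep q i)],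
       maxStep t i, minStep q i) := rfl

-- A's loop, as a function of the input prefix
def loopA (p : List Int) : List Int × (Int × Int × Int) × (Int × Int) :=
  (PySem.List.enumerate p 0).foldl solveStep ([], (-pvINF, -pvINF, -pvINF), (pvINF, pvINF))

lemma pvOut_eq (s : List Int) (h3 : 3 ≤ s.length)
    (hb : ∀ x ∈ s, -pvINF < x ∧ x < pvINF) :
    pvOut (mx3 s.reverse) (mn2 s) =
      max (((PySem.List.pyGet? s (-1)).getD 0) * ((PySem.List.pyGet? s (-2)).getD 0) *
            ((PySem.List.pyGet? s (-3)).getD 0))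
          (((PySem.List.pyGet? s (-1)).getD 0) * ((PySem.List.pyGet? s 0).getD 0) *
            ((PySem.List.pyGet? s 1).getD 0)) := by
  rcases s with _ | ⟨x, _ | ⟨y, _ | ⟨z, t⟩⟩⟩ <;> simp at h3
  rcases hr : (x :: y :: z :: t).reverse with _ | ⟨a, _ | ⟨b, _ | ⟨c, rest⟩⟩⟩ <;>
    (try (have hl := congrArg List.length hr
          simp only [List.length_reverse, List.length_cons, List.length_nil] at hl
          omega))
  have hsr : x :: y :: z :: t = rest.reverse ++ [c, b, a] := by
    rw [← List.reverse_reverse (x :: y :: z :: t), hr]; simp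
  have hgm1 : PySem.List.pyGet? (x :: y :: z :: t) (-1) = some a := by
    rw [PySem.List.pyGet?_neg_one, ← List.head?_reverse, hr]; rfl
  have hgm2 : PySem.List.pyGet? (x :: y :: z :: t) (-2) = some b := by
    rw [PySem.List.pyGet?_neg_ofNat _ 2 (by norm_num) (by simp)]
    rw [hsr]
    have h2 : (rest.reverse ++ [c, b, a]).length - 2 = rest.reverse.length + 1 := by
      simp
    rw [h2, List.getElem?_append_right (by omega)]
    simp
  have hgm3 : PySem.List.pyGet? (x :: y :: z :: t) (-3) = some c := by
    rw [PySem.List.pyGet?_neg_ofNat _ 3 (by norm_num) (by simp)]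
    rw [hsr]
    have h2 : (rest.reverse ++ [c, b, a]).length - 3 = rest.reverse.length := by
      simp
    rw [h2, List.getElem?_append_right (by omega)]
    simp
  have hg0 : PySem.List.pyGet? (x :: y :: z :: t) 0 = some x := by
    rw [PySem.List.pyGet?_zero]; rfl
  have hg1 : PySem.List.pyGet? (x :: y :: z :: t) 1 = some y := by
    rw [PySem.List.pyGet?_of_nonneg (xs := x :: y :: z :: t) (i := 1) (by norm_num)]; rfl
  have hma : a ∈ x :: y :: z :: t := by
    rw [← List.mem_reverse, hr]; simp
  have hmb : b ∈ x :: y :: z :: t := by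
    rw [← List.mem_reverse, hr]; simp
  have hmc : c ∈ x :: y :: z :: t := by
    rw [← List.mem_reverse, hr]; simp
  obtain ⟨ha1, ha2⟩ := hb a hma
  obtain ⟨hb1, hb2⟩ := hb b hmb
  obtain ⟨hc1, hc2⟩ := hb c hmc
  obtain ⟨hx1, hx2⟩ := hb x (by simp)
  obtain ⟨hy1, hy2⟩ := hb y (by simp)
  rw [hgm1, hgm2, hgm3, hg0, hg1]
  have na : a ≠ -pvINF := by omega
  have nb : b ≠ -pvINF := by omega
  have nc : c ≠ -pvINF := by omega
  have nx : x ≠ pvINF := by omega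
  have ny : y ≠ pvINF := by omega
  simp [pvOut, mx3, mn2, na, nb, nc, nx, ny]

lemma solve_alt_snoc (p : List Int) (i : Int) :
    solve_alt (p ++ [i]) = solve_alt p ++
      (if (p.length : Int) < 2 then [(-1 : Int)]
       else
        let s := S (p ++ [i])
        let g := fun (k : Int) => (PySem.List.pyGet? s k).getD 0
        [max (g (-1) * g (-2) * g (-3)) (g (-1) * g 0 * g 1)]) := by
  unfold solve_alt
  have hlen : (((p ++ [i]).length : Nat) : Int) = (p.length : Int) + 1 := by
    simp
  rw [hlen, PySem.List.pyRange_one_succ_right (Int.natCast_nonneg _), List.foldl_append]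
  simp only [List.foldl_cons, List.foldl_nil]
  have hpre : (PySem.List.pyRange 0 (p.length : Int) 1).foldl (altBody (p ++ [i])) []
      = (PySem.List.pyRange 0 (p.length : Int) 1).foldl (altBody p) [] := by
    apply PySem.List.foldl_congr_mem
    intro acc ind hm
    obtain ⟨h0, h1⟩ := PySem.List.mem_pyRange_one.mp hm
    unfold altBody
    by_cases hc : ind < 2
    · simp [hc]
    · rw [if_neg hc, if_neg hc]
      have hsl : PySem.List.slice (p ++ [i]) none (some (ind + 1))
          = PySem.List.slice p none (some (ind + 1)) := by
        rw [PySem.List.slice_to _ (by omega), PySem.List.slice_to _ (by omega),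
            List.take_append_of_le_length (by omega)]
      rw [hsl]
  rw [hpre]
  unfold altBody
  by_cases hc : (p.length : Int) < 2
  · simp [hc]
  · rw [if_neg hc, if_neg hc]
    have hsl : PySem.List.slice (p ++ [i]) none (some ((p.length : Int) + 1)) = p ++ [i] := by
      rw [PySem.List.slice_to _ (by omega)]
      have : ((p.length : Int) + 1).toNat = (p ++ [i]).length := by simp
      rw [this, List.take_length]
    rw [hsl]
    rfl

lemma loopA_char : ∀ p : List Int, (∀ x ∈ p, -pvINF < x ∧ x < pvINF) →
    loopA p = (solve_alt p, mx3 (S p).reverse, mn2 (S p)) := by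
  intro p
  induction p using List.reverseRecOn with
  | nil => intro _; decide
  | append_singleton p i ih =>
    intro hb
    have hbp : ∀ x ∈ p, -pvINF < x ∧ x < pvINF := fun x hx => hb x (by simp [hx])
    obtain ⟨hi1, hi2⟩ := hb i (by simp)
    unfold loopA at ih ⊢
    rw [PySem.List.enumerate_append, List.foldl_append, ih hbp]
    simp only [PySem.List.enumerate_cons, PySem.List.enumerate_nil,
      List.foldl_cons, List.foldl_nil]
    rw [solveStep_eq]
    have hpair : (S p).Pairwise (· ≤ ·) := PySem.List.sorted_pairwise p (fun x => x)
    have hmx : mx3 (S (p ++ [i])).reverse = maxStep (mx3 (S p).reverse) i := by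
      rw [S_snoc, rev_orderedInsert i (S p) hpair,
          mx3_insD i _ hi1 (List.pairwise_reverse.mpr hpair)]
    have hmn : mn2 (S (p ++ [i])) = minStep (mn2 (S p)) i := by
      rw [S_snoc, mn2_orderedInsert i _ hi2]
    rw [solve_alt_snoc]
    simp only [Prod.mk.injEq]
    refine ⟨?_, hmx.symm, hmn.symm⟩
    rw [zero_add]
    by_cases hc : (p.length : Int) < 2
    · simp [hc]
    · rw [if_neg hc, if_neg hc, ← hmx, ← hmn]
      have h3 : 3 ≤ (S (p ++ [i])).length := by
        unfold S; rw [PySem.List.length_sorted]; simp; omega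
      have hbs : ∀ x ∈ S (p ++ [i]), -pvINF < x ∧ x < pvINF := fun x hx =>
        hb x ((PySem.List.mem_sorted _ _ _ _).mp hx)
      rw [pvOut_eq _ h3 hbs]

-- ===== VERDICT (by name: the statement is the Claim_ definition above) =====
theorem solve_spec : Claim_equal_solve := by
  intro A hdom
  have hb : ∀ x ∈ A, -pvINF < x ∧ x < pvINF := by
    intro x hx
    unfold Dom_solve at hdom
    rw [List.all_eq_true] at hdom
    have := hdom x hx
    simp [pvDomInt] at this
    unfold pvINF
    omega
  show solve A = solve_alt A
  unfold solve
  have := loopA_char A hb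
  unfold loopA at this
  rw [this]
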